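-- pv_equiv track=rewrite | github.com/carlzimmerman/zimmerman-formula | extended_research/biotech/hybrid_z2_test/m4_pipeline/m4_empirical_stability_screener.py | _identify_domains
-- ===== SOURCE A (Python) =====
-- from typing import Dict, List, Tuple, Optional
--
-- BBB_PEPTIDES = {
--     'angiopep2': 'TFFYGGSRGKRNNFKTEEY',
--     'rvg29': 'YTIWMPENPRPGTPCDIFTNSRGKRASNG',
--     'tat': 'YGRKKRRQRRR',
--     'irgd': 'CRGDKGPDC',
-- }
--
-- LINKER_PATTERNS = ['GGGGS', 'GGGGSGGGGS', 'EAAAK', 'PAPAP']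
--
-- def _identify_domains(sequence: str) -> Dict[str, List[Tuple[int, int]]]:
--     """
--     Identify payload, linker, and BBB peptide domains in sequence.
--
--     Returns dict with domain name -> list of (start, end) positions.
--     """
--     domains = {
--         'payload': [],
--         'linker': [],
--         'bbb_peptide': [],
--     }
--
--     seq_upper = sequence.upper()
--
--     # Find BBB peptides
--     bbb_positions = []
--     for name, peptide in BBB_PEPTIDES.items():
--         pos = seq_upper.find(peptide.upper())
--         if pos != -1:
--             bbb_positions.append((pos, pos + len(peptide)))
--             domains['bbb_peptide'].append((pos, pos + len(peptide)))
--
--     # Find linkers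
--     linker_positions = []
--     for linker in LINKER_PATTERNS:
--         start = 0
--         while True:
--             pos = seq_upper.find(linker, start)
--             if pos == -1:
--                 break
--             linker_positions.append((pos, pos + len(linker)))
--             domains['linker'].append((pos, pos + len(linker)))
--             start = pos + 1
--
--     # Payload is everything else
--     all_non_payload = sorted(bbb_positions + linker_positions)
--
--     if not all_non_payload:
--         domains['payload'] = [(0, len(sequence))]
--     else:
--         # Find gaps between non-payload regions
--         prev_end = 0
--         for start, end in all_non_payload:
--             if start > prev_end:
--                 domains['payload'].append((prev_end, start))
--             prev_end = max(prev_end, end)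
--         if prev_end < len(sequence):
--             domains['payload'].append((prev_end, len(sequence)))
--
--     return domains
-- ===== SOURCE B (Python) =====
-- from typing import Dict, List, Tuple
--
-- BBB_PEPTIDES = {
--     'angiopep2': 'TFFYGGSRGKRNNFKTEEY',
--     'rvg29': 'YTIWMPENPRPGTPCDIFTNSRGKRASNG',
--     'tat': 'YGRKKRRQRRR',
--     'irgd': 'CRGDKGPDC',
-- }
--
-- LINKER_PATTERNS = ['GGGGS', 'GGGGSGGGGS', 'EAAAK', 'PAPAP']
--
-- def _identify_domains(sequence: str) -> Dict[str, List[Tuple[int, int]]]: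
--     """Same result as the original, but the payload regions are read off a
--     boolean per-position coverage array in one scan instead of a sort +
--     gap walk over the interval list."""
--     seq_upper = sequence.upper()
--     n = len(sequence)
--
--     bbb = []
--     for peptide in BBB_PEPTIDES.values():
--         pos = seq_upper.find(peptide.upper())
--         if pos != -1:
--             bbb.append((pos, pos + len(peptide)))
--
--     linkers = []
--     for linker in LINKER_PATTERNS:
--         start = 0
--         while True:
--             pos = seq_upper.find(linker, start)
--             if pos == -1:
--                 break
--             linkers.append((pos, pos + len(linker)))
--             start = pos + 1
--
--     intervals = bbb + linkers
--     if not intervals: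
--         payload = [(0, n)]
--     else:
--         covered = [False] * n
--         for s, e in intervals:
--             for j in range(s, e):
--                 covered[j] = True
--         payload = []
--         run_start = None
--         for j in range(n):
--             if not covered[j]:
--                 if run_start is None:
--                     run_start = j
--             elif run_start is not None:
--                 payload.append((run_start, j))
--                 run_start = None
--         if run_start is not None:
--             payload.append((run_start, n))
--
--     return {'payload': payload, 'linker': linkers, 'bbb_peptide': bbb}
-- ===== Notes on version B (the rewrite author's own statement) =====
-- stated objective: alternative
-- what changed: The payload regions are computed by marking a per-position boolean coverage array and collecting maximal uncovered runs in one left-to-right scan, instead of sorting the interval list and walking gaps with a running prev_end.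
import Mathlib
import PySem

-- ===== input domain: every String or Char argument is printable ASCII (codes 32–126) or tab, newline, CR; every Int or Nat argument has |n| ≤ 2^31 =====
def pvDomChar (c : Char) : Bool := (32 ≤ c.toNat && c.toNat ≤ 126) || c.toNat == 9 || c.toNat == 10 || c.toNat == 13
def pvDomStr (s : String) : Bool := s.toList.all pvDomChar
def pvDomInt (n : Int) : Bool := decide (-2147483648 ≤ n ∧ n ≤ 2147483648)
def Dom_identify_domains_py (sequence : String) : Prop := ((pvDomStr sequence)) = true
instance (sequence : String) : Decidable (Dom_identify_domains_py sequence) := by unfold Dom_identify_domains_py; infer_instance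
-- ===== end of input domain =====

-- B re-reads the payload regions off a per-position boolean coverage array in one scan
-- instead of A's sort + gap walk over the interval list; same return value everywhere.

-- Module constants (shared source text of both Pythons)
def pvBBB : List (String × String) :=
  [("angiopep2", "TFFYGGSRGKRNNFKTEEY"),
   ("rvg29", "YTIWMPENPRPGTPCDIFTNSRGKRASNG"),
   ("tat", "YGRKKRRQRRR"),
   ("irgd", "CRGDKGPDC")]

def pvLINKERS : List String := ["GGGGS", "GGGGSGGGGS", "EAAAK", "PAPAP"]

-- ===== PORT A =====
-- A's inner 'while True' find-loop for one linker pattern; it appends the same pair to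
-- linker_positions (.1) and domains['linker'] (.2).  fuel = len(su)+2 always suffices:
-- 'start' strictly increases and stays ≤ len(su).
def pvFindLoopA (su l : List Char) (fuel : Nat) (start : Int)
    (accs : List (Int × Int) × List (Int × Int)) : List (Int × Int) × List (Int × Int) :=
  match fuel with
  | 0 => accs
  | fuel + 1 =>
    let pos := PySem.Chars.findFrom su l start
    if pos = -1 then accs
    else pvFindLoopA su l fuel (pos + 1)
      (accs.1 ++ [(pos, pos + (l.length : Int))], accs.2 ++ [(pos, pos + (l.length : Int))])

-- A's BBB-loop body: appends the found span to both bbb_positions and domains['bbb_peptide']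
def pvBbbStepA (su : List Char) (st : List (Int × Int) × List (Int × Int)) (np : String × String) :
    List (Int × Int) × List (Int × Int) :=
  let pos := PySem.Chars.find su (PySem.Chars.upper np.2.toList)
  if pos ≠ -1 then
    (st.1 ++ [(pos, pos + (np.2.toList.length : Int))],
     st.2 ++ [(pos, pos + (np.2.toList.length : Int))])
  else st

-- A's gap-walk step over the sorted non-payload intervals (state: payload list, prev_end)
def pvGapStep (st : List (Int × Int) × Int) (se : Int × Int) : List (Int × Int) × Int :=
  ((if st.2 < se.1 then st.1 ++ [(st.2, se.1)] else st.1), max st.2 se.2)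

-- dict 'domains' has the fixed keys payload, linker, bbb_peptide (in that order); it is
-- carried as the three value lists.  String ops go through PySem.Chars on toList.
def identify_domains_py (sequence : String) : List (String × List (Int × Int)) :=
  let su := (PySem.Str.upper sequence).toList
  let n := PySem.Str.len sequence
  -- BBB loop: appends to bbb_positions (.1) and domains['bbb_peptide'] (.2)
  let bbbSt := pvBBB.foldl (pvBbbStepA su) ([], [])
  -- linker loops: linker_positions (.1) and domains['linker'] (.2)
  let linkSt := pvLINKERS.foldl (fun st l => pvFindLoopA su l.toList (su.length + 2) 0 st) ([], [])
  let allnp := PySem.List.sorted2 (bbbSt.1 ++ linkSt.1) (fun p => p.1) (fun p => p.2)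
  let payload :=
    if allnp = [] then [((0 : Int), n)]
    else
      let st := allnp.foldl pvGapStep ([], 0)
      if st.2 < n then st.1 ++ [(st.2, n)] else st.1
  [("payload", payload), ("linker", linkSt.2), ("bbb_peptide", bbbSt.2)]

-- ===== PORT B =====
-- B's find-loop for one linker pattern (identical source text in Source B, single list)
def pvFindLoopB (su l : List Char) (fuel : Nat) (start : Int)
    (acc : List (Int × Int)) : List (Int × Int) :=
  match fuel with
  | 0 => acc
  | fuel + 1 =>
    let pos := PySem.Chars.findFrom su l start
    if pos = -1 then acc
    else pvFindLoopB su l fuel (pos + 1) (acc ++ [(pos, pos + (l.length : Int))])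

-- B's BBB-loop body (single list)
def pvBbbStepB (su : List Char) (acc : List (Int × Int)) (np : String × String) :
    List (Int × Int) :=
  let pos := PySem.Chars.find su (PySem.Chars.upper np.2.toList)
  if pos ≠ -1 then acc ++ [(pos, pos + (np.2.toList.length : Int))] else acc

-- B's coverage marking for one interval (for j in range(s, e): covered[j] = True);
-- interval starts are always ≥ 0, so j.toNat is Python's covered[j]
def pvCoverStep (cov : List Bool) (se : Int × Int) : List Bool :=
  (PySem.List.pyRange se.1 se.2).foldl (fun (c : List Bool) j => c.set j.toNat true) cov

-- B's trailing 'if run_start is not None: payload.append((run_start, n))'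
def pvRunFinish (st : List (Int × Int) × Option Int) (b : Int) : List (Int × Int) :=
  match st.2 with
  | some r => st.1 ++ [(r, b)]
  | none => st.1

-- B's run-scan step (state: payload list, run_start); pred j = covered[j]
def pvRunStepP (pred : Int → Bool) (st : List (Int × Int) × Option Int) (j : Int) :
    List (Int × Int) × Option Int :=
  if pred j = false then
    match st.2 with
    | none => (st.1, some j)
    | some _ => st
  else
    match st.2 with
    | some r => (st.1 ++ [(r, j)], none)
    | none => st

def identify_domains_py_alt (sequence : String) : List (String × List (Int × Int)) :=
  let su := (PySem.Str.upper sequence).toList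
  let n := PySem.Str.len sequence
  let bbb := pvBBB.foldl (pvBbbStepB su) []
  let linkers := pvLINKERS.foldl (fun acc l => pvFindLoopB su l.toList (su.length + 2) 0 acc) []
  let intervals := bbb ++ linkers
  let payload :=
    if intervals = [] then [((0 : Int), n)]
    else
      let covered := intervals.foldl pvCoverStep (List.replicate n.toNat false)
      let fin := (PySem.List.pyRange 0 n).foldl
        (pvRunStepP (fun j => PySem.List.pyGetD covered j false)) ([], none)
      pvRunFinish fin n
  [("payload", payload), ("linker", linkers), ("bbb_peptide", bbb)]

-- ===== PRECONDITION & SPEC =====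
def Spec_identify_domains_py (sequence : String) (out : List (String × List (Int × Int))) : Prop := out = identify_domains_py_alt sequence
instance (sequence : String) (out : List (String × List (Int × Int))) : Decidable (Spec_identify_domains_py sequence out) := by unfold Spec_identify_domains_py; infer_instance

-- ===== CLAIM (what is proved, stated in full; the proofs are below) =====
def Claim_equal_identify_domains_py : Prop := ∀ (sequence : String), Dom_identify_domains_py sequence → Spec_identify_domains_py sequence (identify_domains_py sequence)

-- ===== LEMMAS AND PROOFS =====

-- the coverage predicate: j lies in some interval of L
def pvCov (L : List (Int × Int)) (j : Int) : Bool :=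
  L.any (fun p => decide (p.1 ≤ j) && decide (j < p.2))

-- what A's gap walk produces from prev_end p on the remaining sorted intervals
def pvGapRun (p : Int) (R : List (Int × Int)) (n : Int) : List (Int × Int) :=
  match R with
  | [] => if p < n then [(p, n)] else []
  | (s, e) :: R' => (if p < s then [(p, s)] else []) ++ pvGapRun (max p e) R' n

def pvRunFold (pred : Int → Bool) (a b : Int) (st : List (Int × Int) × Option Int) :
    List (Int × Int) × Option Int :=
  (PySem.List.pyRange a b).foldl (pvRunStepP pred) st

def pvRuns (pred : Int → Bool) (a b : Int) : List (Int × Int) :=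
  pvRunFinish (pvRunFold pred a b ([], none)) b

-- interval sanity: within [0, n) bounds and nonempty
def pvOK (n : Int) (iv : Int × Int) : Prop := 0 ≤ iv.1 ∧ iv.1 < iv.2 ∧ iv.2 ≤ n

-- A's pair loops equal B's single loops, componentwise
theorem pvFindLoop_pair (su l : List Char) :
    ∀ (fuel : Nat) (start : Int) (a1 a2 : List (Int × Int)),
    pvFindLoopA su l fuel start (a1, a2)
      = (pvFindLoopB su l fuel start a1, pvFindLoopB su l fuel start a2) := by
  intro fuel
  induction fuel with
  | zero => intro start a1 a2; simp [pvFindLoopA, pvFindLoopB]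
  | succ f ih =>
    intro start a1 a2
    simp only [pvFindLoopA, pvFindLoopB]
    by_cases h : PySem.Chars.findFrom su l start = -1
    · simp [h]
    · simp [h, ih]

theorem pvLinkFold_pair (su : List Char) (f : Nat) :
    ∀ (ls : List String) (a1 a2 : List (Int × Int)),
    ls.foldl (fun st l => pvFindLoopA su l.toList f 0 st) (a1, a2)
      = (ls.foldl (fun acc l => pvFindLoopB su l.toList f 0 acc) a1,
         ls.foldl (fun acc l => pvFindLoopB su l.toList f 0 acc) a2) := by
  intro ls
  induction ls with
  | nil => intro a1 a2; simp
  | cons l ls ih =>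
    intro a1 a2
    simp only [List.foldl_cons]
    rw [pvFindLoop_pair, ih]

theorem pvBbbFold_pair (su : List Char) :
    ∀ (ps : List (String × String)) (a1 a2 : List (Int × Int)),
    ps.foldl (pvBbbStepA su) (a1, a2)
      = (ps.foldl (pvBbbStepB su) a1, ps.foldl (pvBbbStepB su) a2) := by
  intro ps
  induction ps with
  | nil => intro a1 a2; simp
  | cons np ps ih =>
    intro a1 a2
    simp only [List.foldl_cons, pvBbbStepA, pvBbbStepB]
    by_cases h : PySem.Chars.find su (PySem.Chars.upper np.2.toList) ≠ -1
    · simp only [if_pos h]; rw [ih]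
    · simp only [if_neg h]; rw [ih]

-- setting a range of positions in the coverage array
theorem pvSetRange (s e : Int) (hs : 0 ≤ s) (c : List Bool) :
    ((PySem.List.pyRange s e).foldl (fun (c : List Bool) j => c.set j.toNat true) c).length = c.length ∧
    ∀ k : Nat, k < c.length →
      ((PySem.List.pyRange s e).foldl (fun (c : List Bool) j => c.set j.toNat true) c).getD k false
        = ((decide (s ≤ (k : Int)) && decide ((k : Int) < e)) || c.getD k false) := by
  suffices H : ∀ (m : Nat) (s : Int), (e - s).toNat ≤ m → 0 ≤ s → ∀ (c : List Bool),
      ((PySem.List.pyRange s e).foldl (fun (c : List Bool) j => c.set j.toNat true) c).length = c.length ∧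
      ∀ k : Nat, k < c.length →
        ((PySem.List.pyRange s e).foldl (fun (c : List Bool) j => c.set j.toNat true) c).getD k false
          = ((decide (s ≤ (k : Int)) && decide ((k : Int) < e)) || c.getD k false) from
    H (e - s).toNat s le_rfl hs c
  intro m
  induction m with
  | zero =>
    intro s hm hs c
    have hes : e ≤ s := by omega
    rw [PySem.List.pyRange_one_eq_nil hes]
    refine ⟨rfl, fun k hk => ?_⟩
    have h1 : (decide (s ≤ (k : Int)) && decide ((k : Int) < e)) = false := by
      rw [Bool.and_eq_false_iff]
      by_cases h2 : s ≤ (k : Int)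
      · right; simp only [decide_eq_false_iff_not]; omega
      · left; simp only [decide_eq_false_iff_not]; omega
    simp [h1]
  | succ m ih =>
    intro s hm hs c
    by_cases hes : e ≤ s
    · rw [PySem.List.pyRange_one_eq_nil hes]
      refine ⟨rfl, fun k hk => ?_⟩
      have h1 : (decide (s ≤ (k : Int)) && decide ((k : Int) < e)) = false := by
        rw [Bool.and_eq_false_iff]
        by_cases h2 : s ≤ (k : Int)
        · right; simp only [decide_eq_false_iff_not]; omega
        · left; simp only [decide_eq_false_iff_not]; omega
      simp [h1]
    · push_neg at hes
      rw [PySem.List.pyRange_one_cons hes, List.foldl_cons]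
      obtain ⟨ihlen, ihget⟩ := ih (s + 1) (by omega) (by omega) (c.set s.toNat true)
      refine ⟨by rw [ihlen, List.length_set], fun k hk => ?_⟩
      rw [ihget k (by rw [List.length_set]; exact hk)]
      have hset : (c.set s.toNat true).getD k false
          = if s.toNat = k then true else c.getD k false := by
        by_cases hsk : s.toNat = k
        · subst hsk
          simp [List.getD_eq_getElem?_getD, List.getElem?_set_self, hk]
        · simp [List.getD_eq_getElem?_getD, List.getElem?_set_ne hsk, hsk]
      rw [hset]
      by_cases hsk : s.toNat = k
      · have h1 : s ≤ (k : Int) := by omega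
        have h2 : (k : Int) < e := by omega
        simp [hsk, h1, h2]
      · have h1 : (decide (s + 1 ≤ (k : Int)) && decide ((k : Int) < e))
            = (decide (s ≤ (k : Int)) && decide ((k : Int) < e)) := by
          simp only [← Bool.decide_and]
          rw [decide_eq_decide]
          omega
        rw [if_neg hsk, h1]

-- the coverage array realizes pvCov
theorem pvCovered (L : List (Int × Int)) (hL : ∀ iv ∈ L, 0 ≤ iv.1) (c : List Bool) :
    (L.foldl pvCoverStep c).length = c.length ∧
    ∀ k : Nat, k < c.length →
      (L.foldl pvCoverStep c).getD k false = (pvCov L k || c.getD k false) := by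
  induction L generalizing c with
  | nil => exact ⟨rfl, fun k hk => by simp [pvCov]⟩
  | cons se L ih =>
    rcases se with ⟨s, e⟩
    have hs : (0 : Int) ≤ s := hL (s, e) List.mem_cons_self
    simp only [List.foldl_cons, pvCoverStep]
    obtain ⟨slen, sget⟩ := pvSetRange s e hs c
    obtain ⟨ihlen, ihget⟩ := ih (fun iv hiv => hL iv (List.mem_cons_of_mem _ hiv))
      ((PySem.List.pyRange s e).foldl (fun (c : List Bool) j => c.set j.toNat true) c)
    simp only [pvCoverStep] at ihlen ihget
    refine ⟨by rw [ihlen, slen], fun k hk => ?_⟩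
    rw [ihget k (by rw [slen]; exact hk), sget k hk]
    simp only [pvCov, List.any_cons]
    cases L.any fun p => decide (p.1 ≤ (k : Int)) && decide ((k : Int) < p.2) <;> simp

-- run-scan bookkeeping lemmas
theorem pvRunFold_acc (pred : Int → Bool) (l : List Int) :
    ∀ (acc : List (Int × Int)) (r : Option Int),
    l.foldl (pvRunStepP pred) (acc, r)
      = (acc ++ (l.foldl (pvRunStepP pred) ([], r)).1, (l.foldl (pvRunStepP pred) ([], r)).2) := by
  induction l with
  | nil => intro acc r; simp
  | cons j l ih =>
    intro acc r
    simp only [List.foldl_cons]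
    have hstep : pvRunStepP pred (acc, r) j
        = (acc ++ (pvRunStepP pred ([], r) j).1, (pvRunStepP pred ([], r) j).2) := by
      unfold pvRunStepP
      rcases r with _ | r0 <;> by_cases h : pred j = false <;> simp [h]
    rw [hstep, ih]
    conv_rhs => rw [ih ((pvRunStepP pred ([], r) j).1) ((pvRunStepP pred ([], r) j).2)]
    simp [List.append_assoc]

theorem pvRunFold_uncov_some (pred : Int → Bool) :
    ∀ (a b : Int), (∀ j, a ≤ j → j < b → pred j = false) →
    ∀ (acc : List (Int × Int)) (r : Int), pvRunFold pred a b (acc, some r) = (acc, some r) := by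
  intro a₀ b
  suffices H : ∀ (m : Nat) (a : Int), (b - a).toNat ≤ m → (∀ j, a ≤ j → j < b → pred j = false) →
      ∀ (acc : List (Int × Int)) (r : Int), pvRunFold pred a b (acc, some r) = (acc, some r) from
    fun h acc r => H (b - a₀).toNat a₀ le_rfl h acc r
  intro m
  induction m with
  | zero =>
    intro a hm h acc r
    have hab : b ≤ a := by omega
    simp [pvRunFold, PySem.List.pyRange_one_eq_nil hab]
  | succ m ih =>
    intro a hm h acc r
    by_cases hab : b ≤ a
    · simp [pvRunFold, PySem.List.pyRange_one_eq_nil hab]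
    · push_neg at hab
      rw [pvRunFold, PySem.List.pyRange_one_cons hab, List.foldl_cons]
      have hstep : pvRunStepP pred (acc, some r) a = (acc, some r) := by
        simp [pvRunStepP, h a le_rfl hab]
      rw [hstep]
      exact ih (a + 1) (by omega) (fun j hja hjb => h j (by omega) hjb) acc r

theorem pvRunFold_uncov_none (pred : Int → Bool) (a b : Int)
    (h : ∀ j, a ≤ j → j < b → pred j = false) (acc : List (Int × Int)) :
    pvRunFold pred a b (acc, none) = if a < b then (acc, some a) else (acc, none) := by
  by_cases hab : a < b
  · rw [if_pos hab, pvRunFold, PySem.List.pyRange_one_cons hab, List.foldl_cons]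
    have hstep : pvRunStepP pred (acc, none) a = (acc, some a) := by
      simp [pvRunStepP, h a le_rfl hab]
    rw [hstep]
    exact pvRunFold_uncov_some pred (a + 1) b (fun j hja hjb => h j (by omega) hjb) acc a
  · rw [if_neg hab]
    push_neg at hab
    simp [pvRunFold, PySem.List.pyRange_one_eq_nil hab]

theorem pvRunFold_cov_none (pred : Int → Bool) :
    ∀ (a b : Int), (∀ j, a ≤ j → j < b → pred j = true) →
    ∀ (acc : List (Int × Int)), pvRunFold pred a b (acc, none) = (acc, none) := by
  intro a₀ b
  suffices H : ∀ (m : Nat) (a : Int), (b - a).toNat ≤ m → (∀ j, a ≤ j → j < b → pred j = true) →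
      ∀ (acc : List (Int × Int)), pvRunFold pred a b (acc, none) = (acc, none) from
    fun h acc => H (b - a₀).toNat a₀ le_rfl h acc
  intro m
  induction m with
  | zero =>
    intro a hm h acc
    have hab : b ≤ a := by omega
    simp [pvRunFold, PySem.List.pyRange_one_eq_nil hab]
  | succ m ih =>
    intro a hm h acc
    by_cases hab : b ≤ a
    · simp [pvRunFold, PySem.List.pyRange_one_eq_nil hab]
    · push_neg at hab
      rw [pvRunFold, PySem.List.pyRange_one_cons hab, List.foldl_cons]
      have hstep : pvRunStepP pred (acc, none) a = (acc, none) := by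
        simp [pvRunStepP, h a le_rfl hab]
      rw [hstep]
      exact ih (a + 1) (by omega) (fun j hja hjb => h j (by omega) hjb) acc

theorem pvRunFold_cov_some (pred : Int → Bool) (a b : Int)
    (h : ∀ j, a ≤ j → j < b → pred j = true) (hab : a < b)
    (acc : List (Int × Int)) (r : Int) :
    pvRunFold pred a b (acc, some r) = (acc ++ [(r, a)], none) := by
  rw [pvRunFold, PySem.List.pyRange_one_cons hab, List.foldl_cons]
  have hstep : pvRunStepP pred (acc, some r) a = (acc ++ [(r, a)], none) := by
    simp [pvRunStepP, h a le_rfl hab]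
  rw [hstep]
  exact pvRunFold_cov_none pred (a + 1) b (fun j hja hjb => h j (by omega) hjb) (acc ++ [(r, a)])

theorem pvRunFold_congr (pred pred' : Int → Bool) (a b : Int)
    (h : ∀ j, a ≤ j → j < b → pred j = pred' j) (st : List (Int × Int) × Option Int) :
    pvRunFold pred a b st = pvRunFold pred' a b st := by
  unfold pvRunFold
  apply PySem.List.foldl_congr_mem
  intro acc x hx
  rw [PySem.List.mem_pyRange_one] at hx
  unfold pvRunStepP
  rw [h x hx.1 hx.2]

-- A's fold + tail step is pvGapRun
theorem pvGapFold (n : Int) :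
    ∀ (R : List (Int × Int)) (acc : List (Int × Int)) (p : Int),
    (if (R.foldl pvGapStep (acc, p)).2 < n
      then (R.foldl pvGapStep (acc, p)).1 ++ [((R.foldl pvGapStep (acc, p)).2, n)]
      else (R.foldl pvGapStep (acc, p)).1)
      = acc ++ pvGapRun p R n := by
  intro R
  induction R with
  | nil =>
    intro acc p
    simp only [List.foldl_nil, pvGapRun]
    split <;> simp
  | cons se R ih =>
    intro acc p
    rcases se with ⟨s, e⟩
    simp only [List.foldl_cons, pvGapRun]
    rw [show pvGapStep (acc, p) (s, e)
        = ((if p < s then acc ++ [(p, s)] else acc), max p e) from rfl]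
    rw [ih]
    by_cases h : p < s <;> simp [h, List.append_assoc]

theorem pvRuns_congr (pred pred' : Int → Bool) (a b : Int)
    (h : ∀ j, a ≤ j → j < b → pred j = pred' j) : pvRuns pred a b = pvRuns pred' a b := by
  unfold pvRuns
  rw [pvRunFold_congr pred pred' a b h]

theorem pvRuns_decompose (pred : Int → Bool) (a m b : Int) (ham : a ≤ m) (hmb : m ≤ b)
    (acc0 : List (Int × Int)) (h : pvRunFold pred a m ([], none) = (acc0, none)) :
    pvRuns pred a b = acc0 ++ pvRuns pred m b := by
  unfold pvRuns
  have h1 : pvRunFold pred a b ([], none) = pvRunFold pred m b (acc0, none) := by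
    unfold pvRunFold
    rw [PySem.List.pyRange_one_append a m b ham hmb, List.foldl_append]
    rw [show (PySem.List.pyRange a m).foldl (pvRunStepP pred) ([], none) = (acc0, none) from h]
  rw [h1]
  have h2 := pvRunFold_acc pred (PySem.List.pyRange m b) acc0 none
  rw [show pvRunFold pred m b (acc0, none)
      = (acc0 ++ ((PySem.List.pyRange m b).foldl (pvRunStepP pred) ([], none)).1,
         ((PySem.List.pyRange m b).foldl (pvRunStepP pred) ([], none)).2) from h2]
  rcases hY : (PySem.List.pyRange m b).foldl (pvRunStepP pred) ([], none) with ⟨acc1, r⟩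
  have hY' : pvRunFold pred m b ([], none) = (acc1, r) := hY
  rw [hY']
  cases r <;> simp [pvRunFinish]

-- MAIN: on a start-sorted list of sane intervals, the gap walk equals the coverage run-scan
theorem pvMain (n : Int) :
    ∀ (R : List (Int × Int)), R.Pairwise (fun x y => x.1 ≤ y.1) →
    (∀ iv ∈ R, pvOK n iv) →
    ∀ p, 0 ≤ p → p ≤ n → pvGapRun p R n = pvRuns (pvCov R) p n := by
  intro R
  induction R with
  | nil =>
    intro _ _ p hp hpn
    have hcov : ∀ j, p ≤ j → j < n → pvCov [] j = false := by intro j _ _; simp [pvCov]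
    unfold pvRuns pvGapRun
    rw [show pvRunFold (pvCov []) p n ([], none)
        = if p < n then (([] : List (Int × Int)), some p) else ([], none) from
      pvRunFold_uncov_none _ p n hcov []]
    by_cases h : p < n
    · simp [h, pvRunFinish]
    · simp [h, pvRunFinish]
  | cons se R ih =>
    rcases se with ⟨s, e⟩
    intro hpw hok p hp hpn
    obtain ⟨hs0, hse, hen⟩ := hok (s, e) List.mem_cons_self
    have hpwR : R.Pairwise (fun x y => x.1 ≤ y.1) := (List.pairwise_cons.mp hpw).2
    have hhead : ∀ iv ∈ R, s ≤ iv.1 := (List.pairwise_cons.mp hpw).1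
    have hokR : ∀ iv ∈ R, pvOK n iv := fun iv h => hok iv (List.mem_cons_of_mem _ h)
    have hcons : ∀ j : Int, pvCov ((s, e) :: R) j
        = ((decide (s ≤ j) && decide (j < e)) || pvCov R j) := by
      intro j; simp [pvCov]
    have hnotR : ∀ j : Int, j < s → pvCov R j = false := by
      intro j hj
      unfold pvCov
      rw [List.any_eq_false]
      intro iv hiv
      have := hhead iv hiv
      simp only [Bool.and_eq_true, decide_eq_true_eq, not_and]
      omega
    have huncov : ∀ j : Int, j < s → pvCov ((s, e) :: R) j = false := by
      intro j hj
      rw [hcons j, hnotR j hj]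
      have : decide (s ≤ j) = false := by simp; omega
      simp [this]
    have hcovd : ∀ j : Int, s ≤ j → j < e → pvCov ((s, e) :: R) j = true := by
      intro j h1 h2
      rw [hcons j]
      simp [h1, h2]
    have htail : ∀ j : Int, e ≤ j → pvCov ((s, e) :: R) j = pvCov R j := by
      intro j hj
      rw [hcons j]
      have : decide (j < e) = false := by simp; omega
      simp [this]
    by_cases hps : p < s
    · -- gap (p, s), then covered [s, e), rest from e
      have hme : max p e = e := max_eq_right (by omega)
      have h1 : pvRunFold (pvCov ((s, e) :: R)) p s ([], none) = ([], some p) := by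
        rw [pvRunFold_uncov_none _ p s (fun j hja hjb => huncov j hjb) [], if_pos hps]
      have h2 : pvRunFold (pvCov ((s, e) :: R)) s e ([], some p) = ([(p, s)], none) := by
        rw [pvRunFold_cov_some _ s e (fun j hja hjb => hcovd j hja hjb) hse [] p]
        simp
      have h3 : pvRunFold (pvCov ((s, e) :: R)) p e ([], none) = ([(p, s)], none) := by
        unfold pvRunFold
        rw [PySem.List.pyRange_one_append p s e (by omega) (by omega), List.foldl_append]
        rw [show (PySem.List.pyRange p s).foldl (pvRunStepP (pvCov ((s, e) :: R))) ([], none)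
            = ([], some p) from h1]
        exact h2
      rw [pvRuns_decompose (pvCov ((s, e) :: R)) p e n (by omega) hen [(p, s)] h3]
      rw [pvRuns_congr (pvCov ((s, e) :: R)) (pvCov R) e n (fun j hj _ => htail j hj)]
      rw [pvGapRun, hme, if_pos hps, ih hpwR hokR e (by omega) hen]
    · -- no gap
      rw [pvGapRun, if_neg hps]
      by_cases hpe : p < e
      · have hme : max p e = e := max_eq_right (by omega)
        have h3 : pvRunFold (pvCov ((s, e) :: R)) p e ([], none) = ([], none) :=
          pvRunFold_cov_none _ p e (fun j hja hjb => hcovd j (by omega) hjb) []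
        rw [pvRuns_decompose (pvCov ((s, e) :: R)) p e n (by omega) hen [] h3]
        rw [pvRuns_congr (pvCov ((s, e) :: R)) (pvCov R) e n (fun j hj _ => htail j hj)]
        rw [hme, ih hpwR hokR e (by omega) hen]
      · have hme : max p e = p := max_eq_left (by omega)
        rw [pvRuns_congr (pvCov ((s, e) :: R)) (pvCov R) p n (fun j hj _ => htail j (by omega))]
        rw [hme, ih hpwR hokR p hp hpn]
        simp

-- sortedness of Python's tuple sort in the first component
theorem pvInsertLex_pairwise (x : Int × Int) :
    ∀ (ys : List (Int × Int)), ys.Pairwise (fun a b => a.1 ≤ b.1) →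
    (PySem.List.insertBy
        (fun a b => decide (a.1 < b.1) || (!decide (b.1 < a.1) && decide (a.2 < b.2))) x ys).Pairwise
      (fun a b => a.1 ≤ b.1) := by
  intro ys
  induction ys with
  | nil => intro _; simp [PySem.List.insertBy]
  | cons y ys ih =>
    intro h
    rw [List.pairwise_cons] at h
    obtain ⟨hy, hys⟩ := h
    by_cases hb : (decide (x.1 < y.1) || (!decide (y.1 < x.1) && decide (x.2 < y.2))) = true
    · rw [show PySem.List.insertBy
          (fun a b => decide (a.1 < b.1) || (!decide (b.1 < a.1) && decide (a.2 < b.2))) x (y :: ys)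
          = x :: y :: ys from by simp [PySem.List.insertBy, hb]]
      have hxy : x.1 ≤ y.1 := by
        rcases Bool.or_eq_true_iff.mp hb with h1 | h1
        · have := of_decide_eq_true h1; omega
        · have h2 := (Bool.and_eq_true_iff.mp h1).1
          rw [Bool.not_eq_true'] at h2
          have := of_decide_eq_false h2; omega
      refine List.pairwise_cons.mpr ⟨?_, List.pairwise_cons.mpr ⟨hy, hys⟩⟩
      intro z hz
      rcases List.mem_cons.mp hz with hz | hz
      · subst hz; exact hxy
      · exact le_trans hxy (hy z hz)
    · rw [show PySem.List.insertBy
          (fun a b => decide (a.1 < b.1) || (!decide (b.1 < a.1) && decide (a.2 < b.2))) x (y :: ys)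
          = y :: PySem.List.insertBy
              (fun a b => decide (a.1 < b.1) || (!decide (b.1 < a.1) && decide (a.2 < b.2))) x ys from by
        simp only [PySem.List.insertBy]
        rw [if_neg (by simpa using hb)]]
      have hyx : y.1 ≤ x.1 := by
        rw [Bool.or_eq_true_iff] at hb
        push_neg at hb
        have h1 : ¬ (x.1 < y.1) := by simpa using hb.1
        omega
      refine List.pairwise_cons.mpr ⟨?_, ih hys⟩
      intro z hz
      rcases (PySem.List.insertBy_mem_iff _ x z ys).mp hz with hz | hz
      · subst hz; exact hyx
      · exact hy z hz

theorem pvSorted2_pairwise (L : List (Int × Int)) :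
    (PySem.List.sorted2 L (fun p => p.1) (fun p => p.2)).Pairwise (fun a b => a.1 ≤ b.1) := by
  have H : ∀ (M : List (Int × Int)) (acc : List (Int × Int)),
      acc.Pairwise (fun a b => a.1 ≤ b.1) →
      (M.foldl (fun acc x => PySem.List.insertBy
          (fun a b => decide (a.1 < b.1) || (!decide (b.1 < a.1) && decide (a.2 < b.2))) x acc) acc).Pairwise
        (fun a b => a.1 ≤ b.1) := by
    intro M
    induction M with
    | nil => intro acc h; simpa
    | cons x M ih =>
      intro acc h
      simp only [List.foldl_cons]
      exact ih _ (pvInsertLex_pairwise x acc h)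
  have hrw : PySem.List.sorted2 L (fun p => p.1) (fun p => p.2)
      = L.foldl (fun acc x => PySem.List.insertBy
          (fun a b => decide (a.1 < b.1) || (!decide (b.1 < a.1) && decide (a.2 < b.2))) x acc) [] := by
    simp [PySem.List.sorted2]
  rw [hrw]
  exact H L [] List.Pairwise.nil

-- bounds of the intervals produced by the scans
theorem pvFindLoopB_bounds (su l : List Char) (hl : 0 < l.length) :
    ∀ (fuel : Nat) (start : Int) (acc : List (Int × Int)), 0 ≤ start → start ≤ (su.length : Int) →
    (∀ iv ∈ acc, pvOK (su.length : Int) iv) →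
    ∀ iv ∈ pvFindLoopB su l fuel start acc, pvOK (su.length : Int) iv := by
  intro fuel
  induction fuel with
  | zero =>
    intro start acc _ _ hacc iv hiv
    rw [pvFindLoopB] at hiv
    exact hacc iv hiv
  | succ f ih =>
    intro start acc hs0 hslen hacc iv hiv
    rw [pvFindLoopB] at hiv
    by_cases hpos : PySem.Chars.findFrom su l start = -1
    · rw [if_pos hpos] at hiv
      exact hacc iv hiv
    · rw [if_neg hpos] at hiv
      have hk : start.toNat ≤ su.length := by omega
      have hcast : ((start.toNat : Int)) = start := Int.toNat_of_nonneg hs0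
      have hspec := PySem.Chars.findFrom_natCast_spec su l start.toNat hk (by rw [hcast]; exact hpos)
      rw [hcast] at hspec
      obtain ⟨hge, hpre, _⟩ := hspec
      have hlen2 : l.length ≤ su.length - (PySem.Chars.findFrom su l start).toNat := by
        have h1 := hpre.length_le
        simpa [List.length_drop] using h1
      have hq0 : (0 : Int) ≤ PySem.Chars.findFrom su l start := le_trans hs0 hge
      refine ih (PySem.Chars.findFrom su l start + 1)
        (acc ++ [(PySem.Chars.findFrom su l start,
                  PySem.Chars.findFrom su l start + (l.length : Int))])
        (by omega) (by omega) ?_ iv hiv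
      intro jv hjv
      rcases List.mem_append.mp hjv with hjv | hjv
      · exact hacc jv hjv
      · rcases List.mem_singleton.mp hjv with rfl
        exact ⟨hq0, by omega, by omega⟩

theorem pvLinkers_bounds (su : List Char) (f : Nat) :
    ∀ (ls : List String), (∀ l ∈ ls, 0 < l.toList.length) →
    ∀ (acc : List (Int × Int)), (∀ iv ∈ acc, pvOK (su.length : Int) iv) →
    ∀ iv ∈ ls.foldl (fun acc l => pvFindLoopB su l.toList f 0 acc) acc, pvOK (su.length : Int) iv := by
  intro ls
  induction ls with
  | nil => intro _ acc hacc iv hiv; exact hacc iv hiv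
  | cons l ls ih =>
    intro hls acc hacc iv hiv
    simp only [List.foldl_cons] at hiv
    refine ih (fun x hx => hls x (List.mem_cons_of_mem _ hx)) _ ?_ iv hiv
    exact pvFindLoopB_bounds su l.toList (hls l List.mem_cons_self) f 0 acc le_rfl
      (by exact_mod_cast Int.ofNat_le.mpr (Nat.zero_le _)) hacc

theorem pvBbb_bounds (su : List Char) :
    ∀ (ps : List (String × String)), (∀ np ∈ ps, 0 < np.2.toList.length) →
    ∀ (acc : List (Int × Int)), (∀ iv ∈ acc, pvOK (su.length : Int) iv) →
    ∀ iv ∈ ps.foldl (fun acc np =>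
        let pos := PySem.Chars.find su (PySem.Chars.upper np.2.toList)
        if pos ≠ -1 then acc ++ [(pos, pos + (np.2.toList.length : Int))] else acc) acc,
      pvOK (su.length : Int) iv := by
  intro ps
  induction ps with
  | nil => intro _ acc hacc iv hiv; exact hacc iv hiv
  | cons np ps ih =>
    intro hps acc hacc iv hiv
    simp only [List.foldl_cons] at hiv
    refine ih (fun x hx => hps x (List.mem_cons_of_mem _ hx)) _ ?_ iv hiv
    by_cases hpos : PySem.Chars.find su (PySem.Chars.upper np.2.toList) ≠ -1
    · rw [if_pos hpos]
      intro jv hjv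
      rcases List.mem_append.mp hjv with hjv | hjv
      · exact hacc jv hjv
      · rcases List.mem_singleton.mp hjv with rfl
        have hq0 : (0 : Int) ≤ PySem.Chars.find su (PySem.Chars.upper np.2.toList) := by
          have := PySem.Chars.neg_one_le_find su (PySem.Chars.upper np.2.toList)
          omega
        obtain ⟨hpre, -⟩ := PySem.Chars.find_spec hq0
        have hlen2 : (PySem.Chars.upper np.2.toList).length
            ≤ su.length - (PySem.Chars.find su (PySem.Chars.upper np.2.toList)).toNat := by
          have h1 := hpre.length_le
          simpa [List.length_drop] using h1
        have hul : (PySem.Chars.upper np.2.toList).length = np.2.toList.length := by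
          simp [PySem.Chars.upper]
        rw [hul] at hlen2
        have hnp := hps np List.mem_cons_self
        exact ⟨hq0, by omega, by omega⟩
    · rw [if_neg hpos]
      exact hacc

-- ===== VERDICT (by name: the statement is the Claim_ definition above) =====
set_option maxHeartbeats 2000000 in
theorem identify_domains_py_spec : Claim_equal_identify_domains_py := by
  intro sequence _
  unfold Spec_identify_domains_py
  simp only [identify_domains_py, identify_domains_py_alt]
  rw [pvBbbFold_pair, pvLinkFold_pair]
  dsimp only
  set su := (PySem.Str.upper sequence).toList with hsu
  set n := PySem.Str.len sequence with hn
  set bbb := pvBBB.foldl (pvBbbStepB su) [] with hbbb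
  set lnk := pvLINKERS.foldl (fun acc l => pvFindLoopB su l.toList (su.length + 2) 0 acc) [] with hlnk
  have hsuLen : ((su.length : Int)) = n := by
    rw [hsu, hn, PySem.Str.toList_upper, PySem.Str.len_eq]
    simp [PySem.Chars.upper]
  have hn0 : (0 : Int) ≤ n := by
    rw [hn, PySem.Str.len_eq]
    exact Int.natCast_nonneg _
  have hokb : ∀ iv ∈ bbb, pvOK ((su.length : Int)) iv := by
    rw [hbbb]
    exact pvBbb_bounds su pvBBB (by decide) [] (by intro iv h; simp at h)
  have hokl : ∀ iv ∈ lnk, pvOK ((su.length : Int)) iv := by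
    rw [hlnk]
    exact pvLinkers_bounds su (su.length + 2) pvLINKERS (by decide) [] (by intro iv h; simp at h)
  have hok : ∀ iv ∈ bbb ++ lnk, pvOK n iv := by
    intro iv h
    rw [← hsuLen]
    rcases List.mem_append.mp h with h | h
    exacts [hokb iv h, hokl iv h]
  by_cases hL : bbb ++ lnk = []
  · have hS : PySem.List.sorted2 (bbb ++ lnk) (fun p => p.1) (fun p => p.2) = [] := by
      rw [hL]; simp [PySem.List.sorted2]
    rw [if_pos hS, if_pos hL]
  · have hS : PySem.List.sorted2 (bbb ++ lnk) (fun p => p.1) (fun p => p.2) ≠ [] := by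
      intro h
      have hperm := PySem.List.sorted2_perm (bbb ++ lnk) (fun p => p.1) (fun p => p.2) false
      rw [h] at hperm
      exact hL hperm.symm.eq_nil
    rw [if_neg hS, if_neg hL]
    rw [pvGapFold n (PySem.List.sorted2 (bbb ++ lnk) (fun p => p.1) (fun p => p.2)) [] 0]
    have hpw := pvSorted2_pairwise (bbb ++ lnk)
    have hokS : ∀ iv ∈ PySem.List.sorted2 (bbb ++ lnk) (fun p => p.1) (fun p => p.2), pvOK n iv := by
      intro iv h
      exact hok iv
        ((PySem.List.sorted2_perm (bbb ++ lnk) (fun p => p.1) (fun p => p.2) false).mem_iff.mp h)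
    rw [pvMain n _ hpw hokS 0 le_rfl hn0]
    have hBdef : pvRunFinish ((PySem.List.pyRange 0 n).foldl
        (pvRunStepP (fun j => PySem.List.pyGetD
          ((bbb ++ lnk).foldl pvCoverStep (List.replicate n.toNat false)) j false)) ([], none)) n
        = pvRuns (fun j => PySem.List.pyGetD
            ((bbb ++ lnk).foldl pvCoverStep (List.replicate n.toNat false)) j false) 0 n := rfl
    rw [hBdef]
    have hcovfacts := pvCovered (bbb ++ lnk) (fun iv h => (hok iv h).1) (List.replicate n.toNat false)
    have hpred : ∀ j, 0 ≤ j → j < n →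
        (PySem.List.pyGetD ((bbb ++ lnk).foldl pvCoverStep (List.replicate n.toNat false)) j false)
          = pvCov (bbb ++ lnk) j := by
      intro j h0 hjn
      rw [PySem.List.pyGetD_of_nonneg _ _ h0]
      have hk : j.toNat < (List.replicate n.toNat false).length := by
        rw [List.length_replicate]; omega
      have h2 := hcovfacts.2 j.toNat hk
      have h3 : ((List.replicate n.toNat false).getD j.toNat false) = false := by
        rw [List.getD_eq_getElem?_getD, List.getElem?_replicate]
        split <;> rfl
      rw [h2, h3, Int.toNat_of_nonneg h0]
      simp
    rw [pvRuns_congr _ (pvCov (bbb ++ lnk)) 0 n hpred]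
    have hanyeq : ∀ j, (0 : Int) ≤ j → j < n →
        pvCov (PySem.List.sorted2 (bbb ++ lnk) (fun p => p.1) (fun p => p.2)) j
          = pvCov (bbb ++ lnk) j := by
      intro j _ _
      unfold pvCov
      exact List.Perm.any_eq
        (PySem.List.sorted2_perm (bbb ++ lnk) (fun p => p.1) (fun p => p.2) false)
    rw [pvRuns_congr _ (pvCov (bbb ++ lnk)) 0 n hanyeq]
    simp
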